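-- pv_equiv track=rewrite | github.com/stardom1957/astrodm | test_tupples_dates_v2.py | interval_de_sessions
-- ===== SOURCE A (Python) =====
-- def interval_de_sessions(listeDeTuples):
--     borne_sup = len(listeDeTuples) - 1
--     delai = listeDeTuples[borne_sup][1] - listeDeTuples[0][1]
--     if delai > 7 and len(listeDeTuples) != 1:
--         listeDeTuples.pop(0)
--         return interval_de_sessions(listeDeTuples)
--     else:
--         return len(listeDeTuples)-1, borne_sup
-- ===== SOURCE B (Python) =====
-- def interval_de_sessions(listeDeTuples):
--     last = listeDeTuples[-1][1]
--     k = next(i for i, t in enumerate(listeDeTuples) if last - t[1] <= 7)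
--     r = len(listeDeTuples) - 1 - k
--     return r, r
-- ===== Notes on version B (the rewrite author's own statement) =====
-- stated objective: simpler
-- what changed: Replaces A's recursion that pops the front element one at a time (each pop(0) shifting the whole list in place) by a single scan that finds the first index whose date is within 7 days of the last date and computes the result arithmetically, without mutating the input.
-- outside the precondition, e.g. on interval_de_sessions([(0, 0), (5,), (0, 3)]): A returns (2, 2), B returns (2, 2)
import Mathlib
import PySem

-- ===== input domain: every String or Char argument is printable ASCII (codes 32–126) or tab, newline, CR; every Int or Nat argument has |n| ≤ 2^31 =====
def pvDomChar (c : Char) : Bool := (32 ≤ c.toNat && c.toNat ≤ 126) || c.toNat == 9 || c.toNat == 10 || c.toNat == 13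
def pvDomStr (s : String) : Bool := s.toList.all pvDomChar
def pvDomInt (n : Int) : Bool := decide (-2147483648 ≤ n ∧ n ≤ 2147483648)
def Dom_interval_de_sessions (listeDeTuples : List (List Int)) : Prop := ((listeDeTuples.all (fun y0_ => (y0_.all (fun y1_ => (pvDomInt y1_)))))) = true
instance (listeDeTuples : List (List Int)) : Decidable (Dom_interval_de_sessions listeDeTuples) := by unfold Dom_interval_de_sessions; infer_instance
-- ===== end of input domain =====

-- B replaces A's pop-front recursion by one scan for the first index within 7 days of the
-- last date (objective: simpler). A mutates its argument in place (pops the front); B does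
-- not — the equivalence proved here is about the RETURN value only.

-- ===== PORT A =====
def interval_de_sessions (listeDeTuples : List (List Int)) : List Int :=
  let borne_sup : Int := (listeDeTuples.length : Int) - 1
  let delai : Int :=
    ((PySem.List.pyGet? ((PySem.List.pyGet? listeDeTuples borne_sup).getD []) 1).getD 0)
    - ((PySem.List.pyGet? ((PySem.List.pyGet? listeDeTuples 0).getD []) 1).getD 0)
  if h : delai > 7 ∧ listeDeTuples.length ≠ 1 then
    interval_de_sessions (listeDeTuples.drop 1)   -- listeDeTuples.pop(0); recurse
  else
    [(listeDeTuples.length : Int) - 1, borne_sup]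
termination_by listeDeTuples.length
decreasing_by
  cases listeDeTuples with
  | nil =>
    simp only [delai, borne_sup] at h
    exact absurd h (by decide)
  | cons a tl => simp

-- ===== PORT B =====
def interval_de_sessions_alt (listeDeTuples : List (List Int)) : List Int :=
  let last : Int := (PySem.List.pyGet? ((PySem.List.pyGet? listeDeTuples (-1)).getD []) 1).getD 0
  match listeDeTuples.findIdx? (fun t => last - (PySem.List.pyGet? t 1).getD 0 ≤ 7) with
  | some k =>
      let r : Int := (listeDeTuples.length : Int) - 1 - (k : Int)
      [r, r]
  | none => []   -- unreachable: the last element always satisfies the predicate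

-- ===== PRECONDITION & SPEC =====
-- Pre_ excludes the empty list (A raises IndexError) and lists containing a tuple with fewer
-- than 2 fields (A raises IndexError whenever it reads such a tuple; on the rare such inputs
-- where the short tuple is never reached A still returns, and B returns the same value there).
def Pre_interval_de_sessions (listeDeTuples : List (List Int)) : Prop :=
  listeDeTuples ≠ [] ∧ ∀ x ∈ listeDeTuples, 2 ≤ x.length
instance (listeDeTuples : List (List Int)) : Decidable (Pre_interval_de_sessions listeDeTuples) := by unfold Pre_interval_de_sessions; infer_instance
def pvWitness_interval_de_sessions : List (List Int) := [[0, 0], [1, 3]]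

def Spec_interval_de_sessions (listeDeTuples : List (List Int)) (out : List Int) : Prop := out = interval_de_sessions_alt listeDeTuples
instance (listeDeTuples : List (List Int)) (out : List Int) : Decidable (Spec_interval_de_sessions listeDeTuples out) := by unfold Spec_interval_de_sessions; infer_instance

-- ===== CLAIM (what is proved, stated in full; the proofs are below) =====
def Claim_equal_interval_de_sessions : Prop := ∀ (listeDeTuples : List (List Int)), Dom_interval_de_sessions listeDeTuples → Pre_interval_de_sessions listeDeTuples → Spec_interval_de_sessions listeDeTuples (interval_de_sessions listeDeTuples)

-- ===== LEMMAS AND PROOFS =====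

-- the "date" field a tuple contributes in both ports
def pvV (t : List Int) : Int := (PySem.List.pyGet? t 1).getD 0

lemma pvGet_last_eq (l : List (List Int)) (h : l ≠ []) :
    PySem.List.pyGet? l ((l.length : Int) - 1) = l.getLast? := by
  have h1 : 1 ≤ l.length := List.length_pos_iff.mpr h
  have : ((l.length : Int) - 1) = ((l.length - 1 : Nat) : Int) := by omega
  rw [this, PySem.List.pyGet?_natCast, List.getLast?_eq_getElem?]

-- findIdx? skips a front element that fails the predicate
lemma pv_findIdx?_cons_false {α : Type} (p : α → Bool) (x : α) (xs : List α)
    (hx : p x = false) : (x :: xs).findIdx? p = (xs.findIdx? p).map (· + 1) := by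
  simp [List.findIdx?_cons, hx]

-- findIdx? stops at a front element that satisfies the predicate
lemma pv_findIdx?_cons_true {α : Type} (p : α → Bool) (x : α) (xs : List α)
    (hx : p x = true) : (x :: xs).findIdx? p = some 0 := by
  simp [List.findIdx?_cons, hx]

-- when the front element is more than 7 days before the last date, B skips it
lemma pv_alt_cons (a b : List Int) (tl' : List (List Int))
    (hp : pvV (((b :: tl').getLast?).getD []) - pvV a > 7) :
    interval_de_sessions_alt (a :: b :: tl') = interval_de_sessions_alt (b :: tl') := by
  unfold interval_de_sessions_alt
  simp only [PySem.List.pyGet?_neg_one, List.getLast?_cons_cons]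
  rw [pv_findIdx?_cons_false _ a _ (by
    simp only [decide_eq_false_iff_not, not_le]
    simpa [pvV] using hp)]
  cases hfi : (b :: tl').findIdx? (fun t =>
      decide ((PySem.List.pyGet? (((b :: tl').getLast?).getD []) 1).getD 0
        - (PySem.List.pyGet? t 1).getD 0 ≤ 7)) with
  | none => simp
  | some k =>
    simp only [Option.map_some, List.length_cons, List.cons.injEq, and_true]
    constructor <;> (push_cast; ring)

lemma pv_main (l : List (List Int)) (h : l ≠ []) :
    interval_de_sessions l = interval_de_sessions_alt l := by
  induction l with
  | nil => exact absurd rfl h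
  | cons a tl ih =>
    rw [interval_de_sessions]
    cases tl with
    | nil =>
      rw [dif_neg (by simp)]
      simp [interval_de_sessions_alt, PySem.List.pyGet?_neg_one, List.findIdx?_cons]
    | cons b tl' =>
      have hget : PySem.List.pyGet? (a :: b :: tl') (((a :: b :: tl').length : Int) - 1)
          = (b :: tl').getLast? := by
        rw [pvGet_last_eq _ (by simp), List.getLast?_cons_cons]
      by_cases hc : pvV (((b :: tl').getLast?).getD []) - pvV a > 7
      · -- front popped: recurse on the tail
        rw [dif_pos ?_]
        · simp only [List.drop_succ_cons, List.drop_zero]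
          rw [ih (by simp), pv_alt_cons a b tl' hc]
        · refine ⟨?_, by simp⟩
          rw [hget]
          simp only [PySem.List.pyGet?_zero_cons, Option.getD_some]
          simpa [pvV] using hc
      · -- stop: the front element is already within 7 days of the last
        rw [dif_neg ?_]
        · unfold interval_de_sessions_alt
          simp only [PySem.List.pyGet?_neg_one, List.getLast?_cons_cons]
          rw [pv_findIdx?_cons_true _ a _ (by
            simp only [decide_eq_true_eq]
            simp only [pvV] at hc
            omega)]
          simp
        · intro hcons
          apply hc
          have h1 := hcons.1
          rw [hget] at h1
          simp only [PySem.List.pyGet?_zero_cons, Option.getD_some] at h1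
          simpa [pvV] using h1

-- ===== VERDICT (by name: the statement is the Claim_ definition above) =====
theorem interval_de_sessions_spec : Claim_equal_interval_de_sessions := by
  intro l _ hpre
  unfold Spec_interval_de_sessions
  exact pv_main l hpre.1
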